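-- pv_equiv track=rewrite | github.com/LQS-LQS/Graduation-Design | parallel/buffer_algorithm.py | replace_zeros
-- ===== SOURCE A (Python) =====
-- def replace_zeros(data, avg_zeros):
--   data_list = []
--   i = 0
--   while i < len(data):
--     if data[i] == 0:
--       count = 1
--       while count < avg_zeros and i + count < len(data) and data[i+count] == 0:
--         count += 1
--       if count == avg_zeros:
--         data_list.append( 255 )
--         i += avg_zeros
--       else:
--         for j in range(0,count):
--           data_list.append(0)
--         i += count
--     else:
--       data_list.append( data[i] )
--       i += 1
--   return data_list
-- ===== SOURCE B (Python) =====
-- def _flush(zeros, avg_zeros):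
--     # emit a completed run of `zeros` zeros
--     if avg_zeros > 0:
--         return [255] * (zeros // avg_zeros) + [0] * (zeros % avg_zeros)
--     return [0] * zeros
--
-- def replace_zeros(data, avg_zeros):
--     out = []
--     zeros = 0
--     for x in data:
--         if x == 0:
--             zeros += 1
--         else:
--             out += _flush(zeros, avg_zeros)
--             out.append(x)
--             zeros = 0
--     out += _flush(zeros, avg_zeros)
--     return out
-- ===== Notes on version B (the rewrite author's own statement) =====
-- stated objective: alternative
-- what changed: Replaces A's index-jumping while loop with nested re-scan of each zero chunk by a single pass that accumulates the length of each maximal zero run and emits floor(L/avg) copies of 255 plus L mod avg zeros per run (runs copied verbatim when avg_zeros <= 0).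
import Mathlib
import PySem

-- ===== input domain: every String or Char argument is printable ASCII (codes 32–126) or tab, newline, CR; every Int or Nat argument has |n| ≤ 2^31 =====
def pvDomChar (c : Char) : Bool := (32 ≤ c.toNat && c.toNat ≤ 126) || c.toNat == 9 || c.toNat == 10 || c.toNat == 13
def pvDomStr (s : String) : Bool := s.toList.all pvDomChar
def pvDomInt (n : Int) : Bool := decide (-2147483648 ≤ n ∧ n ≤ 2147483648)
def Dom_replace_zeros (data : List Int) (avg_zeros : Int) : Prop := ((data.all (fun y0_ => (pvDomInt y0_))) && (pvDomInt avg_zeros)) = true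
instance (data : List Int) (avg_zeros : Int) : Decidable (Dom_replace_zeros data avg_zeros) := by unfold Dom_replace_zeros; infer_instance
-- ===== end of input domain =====

-- B replaces A's index-jumping while loop (with its inner re-scan of each zero chunk) by a
-- single pass accumulating the length of each maximal zero run; same objective, no speed claim.

-- ===== PORT A =====
-- inner while loop: `while count < avg_zeros and i + count < len(data) and data[i+count] == 0: count += 1`
-- (i and count are nonnegative throughout A's execution, so they are kept as Nat; comparisons
--  with avg_zeros are done on Int, exactly as Python compares them)
def rzInner (data : List Int) (i : Nat) (avg : Int) (count : Nat) : Nat :=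
  if h : (count : Int) < avg ∧ i + count < data.length ∧ data.getD (i + count) 0 = 0 then
    rzInner data i avg (count + 1)
  else count
termination_by (avg - count).toNat
decreasing_by omega

theorem rzInner_ge (data : List Int) (i : Nat) (avg : Int) (count : Nat) :
    count ≤ rzInner data i avg count := by
  unfold rzInner
  split
  · exact le_trans (Nat.le_succ _) (rzInner_ge data i avg (count + 1))
  · exact le_refl _
termination_by (avg - count).toNat
decreasing_by omega

-- outer while loop of A; `data[i]` is in range whenever read (guard `i < len(data)`)
def rzLoop (data : List Int) (avg : Int) (i : Nat) (acc : List Int) : List Int :=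
  if h : i < data.length then
    if data.getD i 0 = 0 then
      let count := rzInner data i avg 1
      if (count : Int) = avg then
        -- `i += avg_zeros`; here avg_zeros = count, so the new index is i + count
        rzLoop data avg (i + count) (acc ++ [255])
      else
        rzLoop data avg (i + count) (acc ++ List.replicate count 0)
    else rzLoop data avg (i + 1) (acc ++ [data.getD i 0])
  else acc
termination_by data.length - i
decreasing_by
  · have := rzInner_ge data i avg 1; omega
  · have := rzInner_ge data i avg 1; omega
  · omega

def replace_zeros (data : List Int) (avg_zeros : Int) : List Int :=
  rzLoop data avg_zeros 0 []

-- ===== PORT B =====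
-- helper `_flush`: emit a completed run of `zeros` zeros
def rzFlush (zeros : Nat) (avg : Int) : List Int :=
  if 0 < avg then
    List.replicate (zeros / avg.toNat) 255 ++ List.replicate (zeros % avg.toNat) 0
  else List.replicate zeros 0

-- the for loop of B: `out` accumulator and the current zero-run length
def rzAltGo (avg : Int) (data : List Int) (out : List Int) (zeros : Nat) : List Int :=
  match data with
  | [] => out ++ rzFlush zeros avg
  | x :: rest =>
    if x = 0 then rzAltGo avg rest out (zeros + 1)
    else rzAltGo avg rest (out ++ rzFlush zeros avg ++ [x]) 0

def replace_zeros_alt (data : List Int) (avg_zeros : Int) : List Int :=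
  rzAltGo avg_zeros data [] 0

-- ===== PRECONDITION & SPEC =====
def Spec_replace_zeros (data : List Int) (avg_zeros : Int) (out : List Int) : Prop := out = replace_zeros_alt data avg_zeros
instance (data : List Int) (avg_zeros : Int) (out : List Int) : Decidable (Spec_replace_zeros data avg_zeros out) := by unfold Spec_replace_zeros; infer_instance

-- ===== CLAIM (what is proved, stated in full; the proofs are below) =====
def Claim_equal_replace_zeros : Prop := ∀ (data : List Int) (avg_zeros : Int), Dom_replace_zeros data avg_zeros → Spec_replace_zeros data avg_zeros (replace_zeros data avg_zeros)


-- ===== LEMMAS AND PROOFS =====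

-- number of leading zeros of a list
def lz : List Int → Nat
  | [] => 0
  | x :: r => if x = 0 then lz r + 1 else 0

theorem drop_of_le_lz (k : Nat) (L : List Int) (hk : k ≤ lz L) :
    L = List.replicate k 0 ++ L.drop k ∧ lz (L.drop k) = lz L - k := by
  induction k generalizing L with
  | zero => simp
  | succ n ih =>
    cases L with
    | nil => simp [lz] at hk
    | cons x r =>
      by_cases hx : x = 0
      · subst hx
        simp [lz] at hk
        have := ih r (by omega)
        refine ⟨?_, ?_⟩
        · calc (0 : Int) :: r = 0 :: (List.replicate n 0 ++ r.drop n) := by rw [← this.1]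
            _ = List.replicate (n+1) 0 ++ (0 :: r).drop (n+1) := by
              simp [List.replicate_succ]
        · simp [List.drop_succ_cons, this.2, lz]
      · simp [lz, hx] at hk

theorem drop_cons_getD (L : List Int) (j : Nat) (h : j < L.length) :
    L.drop j = L.getD j 0 :: L.drop (j+1) := by
  rw [List.drop_eq_getElem_cons h, List.getD_eq_getElem?_getD, List.getElem?_eq_getElem h]
  rfl

theorem rzFlush_zero (avg : Int) : rzFlush 0 avg = [] := by
  unfold rzFlush; split <;> simp

theorem rzFlush_succ_nonpos (z : Nat) (avg : Int) (h : avg ≤ 0) :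
    rzFlush (z + 1) avg = 0 :: rzFlush z avg := by
  unfold rzFlush
  rw [if_neg (by omega), if_neg (by omega)]
  simp [List.replicate_succ]

theorem rzFlush_add_pos (z : Nat) (avg : Int) (h : 0 < avg) :
    rzFlush (z + avg.toNat) avg = 255 :: rzFlush z avg := by
  have ha : 1 ≤ avg.toNat := by omega
  unfold rzFlush
  rw [if_pos h, if_pos h]
  have h1 : (z + avg.toNat) / avg.toNat = z / avg.toNat + 1 := by
    rw [Nat.add_div_right _ (by omega)]
  have h2 : (z + avg.toNat) % avg.toNat = z % avg.toNat := by
    simp [Nat.add_mod_right]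
  rw [h1, h2, List.replicate_succ]
  simp

theorem rzFlush_small (z : Nat) (avg : Int) (h : 0 < avg) (hz : (z : Int) < avg) :
    rzFlush z avg = List.replicate z 0 := by
  unfold rzFlush
  rw [if_pos h]
  have h1 : z / avg.toNat = 0 := Nat.div_eq_of_lt (by omega)
  have h2 : z % avg.toNat = z := Nat.mod_eq_of_lt (by omega)
  rw [h1, h2]
  simp

theorem rzAltGo_acc (avg : Int) (d : List Int) (out : List Int) (z : Nat) :
    rzAltGo avg d out z = out ++ rzAltGo avg d [] z := by
  induction d generalizing out z with
  | nil => simp [rzAltGo]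
  | cons x rest ih =>
    by_cases hx : x = 0
    · subst hx
      simp only [rzAltGo, if_pos]
      exact ih out (z + 1)
    · simp only [rzAltGo, if_neg hx]
      rw [ih (out ++ rzFlush z avg ++ [x]), ih ([] ++ rzFlush z avg ++ [x])]
      simp

theorem rzAltGo_shift (avg : Int) (k : Nat) (v : Int)
    (hF : ∀ z, rzFlush (z + k) avg = v :: rzFlush z avg) :
    ∀ (d : List Int) (z : Nat), rzAltGo avg d [] (z + k) = v :: rzAltGo avg d [] z := by
  intro d
  induction d with
  | nil => intro z; simpa [rzAltGo] using hF z
  | cons x rest ih =>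
    intro z
    by_cases hx : x = 0
    · simp only [rzAltGo, if_pos hx]
      have : z + k + 1 = (z + 1) + k := by omega
      rw [this, ih (z + 1)]
    · simp only [rzAltGo, if_neg hx]
      rw [rzAltGo_acc, rzAltGo_acc avg rest ([] ++ rzFlush z avg ++ [x]), hF z]
      simp

theorem rzAltGo_replicate (avg : Int) (k : Nat) (d : List Int) (z : Nat) :
    rzAltGo avg (List.replicate k 0 ++ d) [] z = rzAltGo avg d [] (z + k) := by
  induction k generalizing z with
  | zero => simp
  | succ n ih =>
    rw [List.replicate_succ]
    simp only [List.cons_append, rzAltGo, if_pos]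
    rw [ih (z + 1)]
    have e : z + 1 + n = z + (n + 1) := by omega
    rw [e]

theorem rzAltGo_flush_out (avg : Int) (d : List Int) (z : Nat) (hd : lz d = 0) :
    rzAltGo avg d [] z = rzFlush z avg ++ rzAltGo avg d [] 0 := by
  cases d with
  | nil => simp [rzAltGo, rzFlush_zero]
  | cons x rest =>
    have hx : x ≠ 0 := by intro h; simp [lz, h] at hd
    simp only [rzAltGo, if_neg hx]
    rw [rzAltGo_acc avg rest ([] ++ rzFlush z avg ++ [x]),
        rzAltGo_acc avg rest ([] ++ rzFlush 0 avg ++ [x]), rzFlush_zero]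
    simp

theorem rzInner_eq (data : List Int) (i : Nat) (avg : Int) (count : Nat) :
    rzInner data i avg count = count + min (lz (data.drop (i + count))) ((avg - count).toNat) := by
  unfold rzInner
  split
  · rename_i h
    obtain ⟨h1, h2, h3⟩ := h
    have hd : data.drop (i + count) = (0 : Int) :: data.drop (i + count + 1) := by
      rw [drop_cons_getD data (i + count) h2, h3]
    have hlz : lz (data.drop (i + count)) = lz (data.drop (i + (count + 1))) + 1 := by
      rw [hd]
      simp [lz, show i + count + 1 = i + (count + 1) from by omega]
    rw [rzInner_eq data i avg (count + 1)]
    omega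
  · rename_i h
    by_cases h1 : (count : Int) < avg
    · by_cases h2 : i + count < data.length
      · have h3 : data.getD (i + count) 0 ≠ 0 := by
          intro hc; exact h ⟨h1, h2, hc⟩
        have : lz (data.drop (i + count)) = 0 := by
          rw [drop_cons_getD data (i + count) h2]
          simp only [lz]
          rw [if_neg h3]
        omega
      · have : data.drop (i + count) = [] := List.drop_eq_nil_of_le (by omega)
        rw [this]
        simp [lz]
    · have : (avg - count).toNat = 0 := by omega
      omega
termination_by (avg - count).toNat
decreasing_by omega

theorem rzLoop_eq (data : List Int) (avg : Int) (i : Nat) (acc : List Int) :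
    rzLoop data avg i acc = acc ++ rzAltGo avg (data.drop i) [] 0 := by
  unfold rzLoop
  split
  · rename_i hi
    have hd : data.drop i = data.getD i 0 :: data.drop (i + 1) := drop_cons_getD data i hi
    split
    · rename_i hx
      -- data[i] == 0
      have hd0 : data.drop i = (0 : Int) :: data.drop (i + 1) := by rw [hd, hx]
      change (if (↑(rzInner data i avg 1) : Int) = avg then
          rzLoop data avg (i + rzInner data i avg 1) (acc ++ [255])
        else rzLoop data avg (i + rzInner data i avg 1)
          (acc ++ List.replicate (rzInner data i avg 1) 0)) = acc ++ rzAltGo avg (List.drop i data) [] 0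
      have hz1 : 1 ≤ lz (data.drop i) := by rw [hd0]; simp [lz]
      have hlzs : lz (data.drop i) = lz (data.drop (i + 1)) + 1 := by
        rw [hd0]; simp [lz]
      have hcount : rzInner data i avg 1 =
          1 + min (lz (data.drop (i + 1))) ((avg - 1).toNat) := by
        simpa using rzInner_eq data i avg 1
      by_cases hpos : 0 < avg
      · -- avg ≥ 1
        have hcnt : rzInner data i avg 1 = min (lz (data.drop i)) avg.toNat := by
          rw [hcount, hlzs]; omega
        split
        · rename_i heq
          -- count == avg: consume avg.toNat zeros, emit 255
          have hca : rzInner data i avg 1 = avg.toNat := by omega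
          have hle : avg.toNat ≤ lz (data.drop i) := by
            rw [hca] at hcnt; omega
          have hdec := drop_of_le_lz avg.toNat (data.drop i) hle
          rw [rzLoop_eq data avg (i + rzInner data i avg 1) (acc ++ [255]), hca]
          have hdd : (data.drop i).drop avg.toNat = data.drop (i + avg.toNat) := by
            rw [List.drop_drop]
          conv_rhs => rw [hdec.1]
          rw [hdd, rzAltGo_replicate,
              rzAltGo_shift avg avg.toNat 255 (fun z => rzFlush_add_pos z avg hpos)
                (data.drop (i + avg.toNat)) 0]
          simp
        · rename_i hne
          -- count < avg: emit count zeros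
          have hzlt : lz (data.drop i) < avg.toNat := by
            rcases Nat.lt_or_ge (lz (data.drop i)) avg.toNat with h | h
            · exact h
            · exfalso; apply hne; rw [hcnt]; omega
          have hca : rzInner data i avg 1 = lz (data.drop i) := by omega
          have hdec := drop_of_le_lz (lz (data.drop i)) (data.drop i) (le_refl _)
          rw [rzLoop_eq data avg (i + rzInner data i avg 1) _, hca]
          have hdd : (data.drop i).drop (lz (data.drop i)) = data.drop (i + lz (data.drop i)) := by
            rw [List.drop_drop]
          have hlz0 : lz (data.drop (i + lz (data.drop i))) = 0 := by
            rw [← hdd]; omega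
          conv_rhs => rw [hdec.1]
          rw [hdd, rzAltGo_replicate]
          simp only [Nat.zero_add]
          rw [rzAltGo_flush_out avg (data.drop (i + lz (data.drop i)))
                (lz (data.drop i)) hlz0,
              rzFlush_small (lz (data.drop i)) avg hpos (by omega)]
          simp
      · -- avg ≤ 0: count = 1, never equals avg
        have hc1 : rzInner data i avg 1 = 1 := by
          rw [hcount]
          have : (avg - 1).toNat = 0 := by omega
          omega
        rw [if_neg (by rw [hc1]; intro hc; omega)]
        rw [rzLoop_eq data avg (i + rzInner data i avg 1) _, hc1]
        conv_rhs => rw [hd0]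
        have hs := rzAltGo_shift avg 1 0 (fun z => rzFlush_succ_nonpos z avg (by omega))
          (data.drop (i + 1)) 0
        have hcons : rzAltGo avg ((0 : Int) :: data.drop (i + 1)) [] 0
            = rzAltGo avg (data.drop (i + 1)) [] 1 := by
          simp [rzAltGo]
        rw [hcons]
        have h1 : (1 : Nat) = 0 + 1 := by omega
        rw [h1, hs]
        simp
    · rename_i hx
      -- data[i] != 0
      rw [rzLoop_eq data avg (i + 1) _, hd]
      simp only [rzAltGo, if_neg hx]
      rw [rzAltGo_acc avg (data.drop (i + 1)) ([] ++ rzFlush 0 avg ++ [data.getD i 0]),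
          rzFlush_zero]
      simp
  · rename_i hi
    have : data.drop i = [] := List.drop_eq_nil_of_le (by omega)
    rw [this]
    simp [rzAltGo, rzFlush_zero]
termination_by data.length - i
decreasing_by all_goals omega

-- ===== VERDICT (by name: the statement is the Claim_ definition above) =====
theorem replace_zeros_spec : Claim_equal_replace_zeros := by
  intro data avg_zeros _
  unfold Spec_replace_zeros replace_zeros replace_zeros_alt
  rw [rzLoop_eq]
  simp
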